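-- pv_equiv track=rewrite | github.com/satriadhikara/Tucil1_13522125 | src/main.py | generate_all_posibilities
-- ===== SOURCE A (Python) =====
-- from typing import List, Tuple, Set, Dict, Optional
--
-- def generate_all_posibilities(
--     matrix: List[List[str]], step: int
-- ) -> List[List[Tuple[str, Tuple[int, int]]]]:
--     rows: int = len(matrix)
--     cols: int = len(matrix[0])
--     all_paths: List[List[Tuple[str, Tuple[int, int]]]] = []
--
--     def generate_paths(
--         start_x: int,
--         start_y: int,
--         path: List[Tuple[str, Tuple[int, int]]] = [],
--         visited: Set[Tuple[int, int]] = set(),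
--         direction: str = "vertical",
--         steps: int = step,
--     ) -> None:
--         if steps == 0:
--             all_paths.append(path.copy())
--             return
--         if direction == "vertical":
--             for next_y in range(rows):
--                 if (start_x, next_y) not in visited:
--                     generate_paths(
--                         start_x,
--                         next_y,
--                         path + [(matrix[next_y][start_x], (start_x, next_y))],
--                         visited | {(start_x, next_y)},
--                         "horizontal",
--                         steps - 1,
--                     )
--         else:  # horizontal
--             for next_x in range(cols):
--                 if (next_x, start_y) not in visited:
--                     generate_paths(
--                         next_x,
--                         start_y,
--                         path + [(matrix[start_y][next_x], (next_x, start_y))],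
--                         visited | {(next_x, start_y)},
--                         "vertical",
--                         steps - 1,
--                     )
--
--     for x in range(cols):
--         generate_paths(
--             x,
--             0,
--             path=[(matrix[0][x], (x, 0))],
--             visited={(x, 0)},
--             direction="vertical",
--             steps=step,
--         )
--
--     return all_paths
-- ===== SOURCE B (Python) =====
-- def generate_all_posibilities(matrix, step):
--     rows = len(matrix)
--     cols = len(matrix[0])
--     if step < 0:
--         return []
--     # level-synchronous expansion: one worklist of partial states, extended `step` times;
--     # every finished path lies at the same depth, so level order equals the DFS pre-order.
--     states = [
--         (x, 0, [(matrix[0][x], (x, 0))], {(x, 0)}, True)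
--         for x in range(cols)
--     ]
--     for _ in range(step):
--         if not states:
--             break
--         new_states = []
--         for (x, y, path, visited, vertical) in states:
--             if vertical:
--                 new_states.extend(
--                     (x, ny, path + [(matrix[ny][x], (x, ny))], visited | {(x, ny)}, False)
--                     for ny in range(rows) if (x, ny) not in visited)
--             else:
--                 new_states.extend(
--                     (nx, y, path + [(matrix[y][nx], (nx, y))], visited | {(nx, y)}, True)
--                     for nx in range(cols) if (nx, y) not in visited)
--         states = new_states
--     return [path for (_, _, path, _, _) in states]
-- ===== Notes on version B (the rewrite author's own statement) =====
-- stated objective: alternative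
-- what changed: A's nested depth-first recursion (with a closure appending to an outer list) is replaced by a level-synchronous worklist: one list of partial states (x, y, path, visited, direction) is expanded in place `step` times and the finished paths are read off; since every finished path lies at the same depth, level order equals A's DFS pre-order exactly.
import Mathlib
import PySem

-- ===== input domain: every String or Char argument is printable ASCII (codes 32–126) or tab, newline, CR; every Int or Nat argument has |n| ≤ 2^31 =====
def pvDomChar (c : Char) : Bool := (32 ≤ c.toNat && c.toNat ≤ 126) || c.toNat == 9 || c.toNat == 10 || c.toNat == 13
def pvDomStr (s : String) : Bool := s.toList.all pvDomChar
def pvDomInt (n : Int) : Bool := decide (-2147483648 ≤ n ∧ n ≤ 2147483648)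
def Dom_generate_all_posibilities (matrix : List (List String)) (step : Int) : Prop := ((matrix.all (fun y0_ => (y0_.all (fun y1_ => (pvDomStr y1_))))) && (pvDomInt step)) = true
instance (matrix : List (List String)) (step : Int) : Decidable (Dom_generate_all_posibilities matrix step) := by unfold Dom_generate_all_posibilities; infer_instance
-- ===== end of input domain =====

-- B replaces A's depth-first recursion by a level-synchronous worklist iterated `step` times (objective: alternative decomposition; same output order since every finished path lies at the same depth).

-- ===== PORT A =====
-- A's inner recursion `generate_paths`; returns (in append order) the paths the Python call appends to all_paths.
-- The `steps < 0 → []` branch is a termination guard only: with steps < 0 the Python recursion never reaches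
-- steps == 0, appends nothing to all_paths, and returns — i.e. it contributes exactly [].
def genPathsA (matrix : List (List String)) (rows cols : Nat)
    (start_x start_y : Nat) (path : List (String × (Int × Int)))
    (visited : PySem.Set (Int × Int)) (direction : String) (steps : Int) :
    List (List (String × (Int × Int))) :=
  if steps = 0 then [path]
  else if steps < 0 then []
  else if direction = "vertical" then
    (List.range rows).foldl (fun acc (next_y : Nat) =>
      if visited.contains ((start_x : Int), (next_y : Int)) then acc
      else acc ++ genPathsA matrix rows cols start_x next_y
        (path ++ [(((matrix.getD next_y []).getD start_x ""), ((start_x : Int), (next_y : Int)))])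
        (visited.add ((start_x : Int), (next_y : Int))) "horizontal" (steps - 1)) []
  else
    (List.range cols).foldl (fun acc (next_x : Nat) =>
      if visited.contains ((next_x : Int), (start_y : Int)) then acc
      else acc ++ genPathsA matrix rows cols next_x start_y
        (path ++ [(((matrix.getD start_y []).getD next_x ""), ((next_x : Int), (start_y : Int)))])
        (visited.add ((next_x : Int), (start_y : Int))) "vertical" (steps - 1)) []
termination_by steps.toNat
decreasing_by all_goals omega

def generate_all_posibilities (matrix : List (List String)) (step : Int) : List (List (String × (Int × Int))) :=
  let rows := matrix.length
  let cols := (matrix.headD []).length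
  (List.range cols).foldl (fun all_paths (x : Nat) =>
    all_paths ++ genPathsA matrix rows cols x 0
      [((matrix.headD []).getD x "", ((x : Int), (0 : Int)))]
      (PySem.Set.ofList [((x : Int), (0 : Int))]) "vertical" step) []

-- ===== PORT B =====
-- a partial state: (x, y, path, visited, vertical?)
def pvExpand (matrix : List (List String)) (rows cols : Nat)
    (s : Nat × Nat × List (String × (Int × Int)) × PySem.Set (Int × Int) × Bool) :
    List (Nat × Nat × List (String × (Int × Int)) × PySem.Set (Int × Int) × Bool) :=
  match s with
  | (x, y, path, visited, vertical) =>
    if vertical then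
      (List.range rows).flatMap (fun (ny : Nat) =>
        if visited.contains ((x : Int), (ny : Int)) then []
        else [(x, ny, path ++ [((matrix.getD ny []).getD x "", ((x : Int), (ny : Int)))],
               visited.add ((x : Int), (ny : Int)), false)])
    else
      (List.range cols).flatMap (fun (nx : Nat) =>
        if visited.contains ((nx : Int), (y : Int)) then []
        else [(nx, y, path ++ [((matrix.getD y []).getD nx "", ((nx : Int), (y : Int)))],
               visited.add ((nx : Int), (y : Int)), true)])

-- the level loop 'for _ in range(step): if not states: break; states = [children]'
def pvLevels (matrix : List (List String)) (rows cols : Nat) :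
    Nat → List (Nat × Nat × List (String × (Int × Int)) × PySem.Set (Int × Int) × Bool)
        → List (Nat × Nat × List (String × (Int × Int)) × PySem.Set (Int × Int) × Bool)
  | 0, states => states
  | n + 1, states =>
    if states.isEmpty then states
    else pvLevels matrix rows cols n (states.flatMap (pvExpand matrix rows cols))

def generate_all_posibilities_alt (matrix : List (List String)) (step : Int) : List (List (String × (Int × Int))) :=
  let rows := matrix.length
  let cols := (matrix.headD []).length
  if step < 0 then []
  else
    let init := (List.range cols).map (fun (x : Nat) =>
      (x, 0, [((matrix.headD []).getD x "", ((x : Int), (0 : Int)))],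
       PySem.Set.ofList [((x : Int), (0 : Int))], true))
    (pvLevels matrix rows cols step.toNat init).map (fun s => s.2.2.1)

-- ===== PRECONDITION & SPEC =====
-- Pre_ excludes exactly the inputs on which the Python A raises IndexError: the empty matrix, and
-- (unless step = 0, where only row 0 is read) matrices with some row shorter than row 0.
def Pre_generate_all_posibilities (matrix : List (List String)) (step : Int) : Prop :=
  matrix ≠ [] ∧ (step = 0 ∨ ∀ row ∈ matrix, (matrix.headD []).length ≤ row.length)
instance (matrix : List (List String)) (step : Int) : Decidable (Pre_generate_all_posibilities matrix step) := by unfold Pre_generate_all_posibilities; infer_instance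

def pvWitness_generate_all_posibilities : List (List String) × Int := ([["a", "b"], ["c", "d"]], 2)

def Spec_generate_all_posibilities (matrix : List (List String)) (step : Int) (out : List (List (String × (Int × Int)))) : Prop := out = generate_all_posibilities_alt matrix step
instance (matrix : List (List String)) (step : Int) (out : List (List (String × (Int × Int)))) : Decidable (Spec_generate_all_posibilities matrix step out) := by unfold Spec_generate_all_posibilities; infer_instance

-- ===== CLAIM (what is proved, stated in full; the proofs are below) =====
def Claim_equal_generate_all_posibilities : Prop := ∀ (matrix : List (List String)) (step : Int), Dom_generate_all_posibilities matrix step → Pre_generate_all_posibilities matrix step → Spec_generate_all_posibilities matrix step (generate_all_posibilities matrix step)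


-- ===== LEMMAS AND PROOFS =====

-- A's recursion read at a B-state tuple.
def pvGA (matrix : List (List String)) (rows cols : Nat)
    (s : Nat × Nat × List (String × (Int × Int)) × PySem.Set (Int × Int) × Bool) (steps : Int) :
    List (List (String × (Int × Int))) :=
  genPathsA matrix rows cols s.1 s.2.1 s.2.2.1 s.2.2.2.1
    (if s.2.2.2.2 then "vertical" else "horizontal") steps

-- A's loop shape 'if visited: skip else acc ++ recursive result' as a flatMap (the PySem book's
-- foldl_append_if appends a singleton, not a list, so this variant is proved here).
theorem pv_foldl_if_app {α β : Type} (p : β → Prop) [DecidablePred p] (g : β → List α) :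
    ∀ (l : List β) (init : List α),
      l.foldl (fun acc y => if p y then acc else acc ++ g y) init
        = init ++ l.flatMap (fun y => if p y then [] else g y) := by
  intro l
  induction l with
  | nil => simp
  | cons y l ih =>
    intro init
    by_cases h : p y <;> simp [h, ih]

theorem pvGA_zero (matrix : List (List String)) (rows cols : Nat) (s) :
    pvGA matrix rows cols s 0 = [s.2.2.1] := by
  rw [pvGA, genPathsA]
  simp

theorem pvGA_neg (matrix : List (List String)) (rows cols : Nat) (s) (steps : Int)
    (h : steps < 0) : pvGA matrix rows cols s steps = [] := by
  rw [pvGA, genPathsA]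
  have h0 : ¬ steps = 0 := by omega
  simp [h0, h]

theorem pvGA_succ (matrix : List (List String)) (rows cols : Nat) (s) (steps : Int)
    (h : 0 < steps) :
    pvGA matrix rows cols s steps
      = (pvExpand matrix rows cols s).flatMap (fun t => pvGA matrix rows cols t (steps - 1)) := by
  obtain ⟨x, y, path, visited, vertical⟩ := s
  have h0 : ¬ steps = 0 := by omega
  have h1 : ¬ steps < 0 := by omega
  cases vertical with
  | true =>
    rw [pvGA]
    rw [genPathsA]
    simp only [if_neg h0, if_neg h1]
    simp [pvExpand]
    rw [pv_foldl_if_app]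
    simp only [List.nil_append, List.flatMap_assoc]
    congr 1
    funext ny
    by_cases hm : ((x : Int), (ny : Int)) ∈ visited <;> simp [hm, pvGA]
  | false =>
    rw [pvGA]
    rw [genPathsA]
    simp only [if_neg h0, if_neg h1]
    simp [pvExpand]
    rw [pv_foldl_if_app]
    simp only [List.nil_append, List.flatMap_assoc]
    congr 1
    funext nx
    by_cases hm : ((nx : Int), (y : Int)) ∈ visited <;> simp [hm, pvGA]

theorem pv_levels (matrix : List (List String)) (rows cols : Nat) :
    ∀ (n : Nat) (states : List (Nat × Nat × List (String × (Int × Int)) × PySem.Set (Int × Int) × Bool)),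
      (pvLevels matrix rows cols n states).map (fun s => s.2.2.1)
        = states.flatMap (fun s => pvGA matrix rows cols s (n : Int)) := by
  intro n
  induction n with
  | zero =>
    intro states
    simp only [pvLevels, Nat.cast_zero, pvGA_zero]
    exact List.map_eq_flatMap
  | succ n ih =>
    intro states
    rw [pvLevels]
    by_cases he : states.isEmpty
    · rw [if_pos he]
      rw [List.isEmpty_iff.mp he]
      simp
    · rw [if_neg he, ih, List.flatMap_assoc]
      have h2 : ((n + 1 : Nat) : Int) - 1 = (n : Int) := by push_cast; ring
      congr 1
      funext s
      rw [pvGA_succ matrix rows cols s ((n + 1 : Nat) : Int) (by push_cast; omega), h2]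

-- ===== VERDICT (by name: the statement is the Claim_ definition above) =====
theorem generate_all_posibilities_spec : Claim_equal_generate_all_posibilities := by
  intro matrix step _ _
  show _ = _
  unfold generate_all_posibilities generate_all_posibilities_alt
  by_cases hneg : step < 0
  · simp only [hneg, if_pos]
    have hz : ∀ x : Nat, genPathsA matrix matrix.length (matrix.headD []).length x 0
        [((matrix.headD []).getD x "", ((x : Int), (0 : Int)))]
        (PySem.Set.ofList [((x : Int), (0 : Int))]) "vertical" step = [] := by
      intro x
      exact pvGA_neg matrix matrix.length (matrix.headD []).length
        (x, 0, [((matrix.headD []).getD x "", ((x : Int), (0 : Int)))],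
         PySem.Set.ofList [((x : Int), (0 : Int))], true) step hneg
    rw [PySem.List.foldl_append_eq_flatMap]
    simp only [List.nil_append]
    rw [List.flatMap_eq_nil_iff.mpr (by intro x _; exact hz x)]
  · rw [if_neg hneg]
    rw [pv_levels, List.flatMap_map, PySem.List.foldl_append_eq_flatMap]
    have hcast : ((step.toNat : Nat) : Int) = step := Int.toNat_of_nonneg (by omega)
    rw [hcast, List.nil_append]
    rfl
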